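-- pv_equiv track=rewrite | github.com/datenschauer/adventofcode | 2021/day_05_a/solution.py | mark_points
-- ===== SOURCE A (Python) =====
-- def mark_points(matrix, list_of_coords):
--     for coords in list_of_coords:
--         start = coords[0]
--         end = coords[1]
--         # Case 1: horizontal line (x1 == x2)
--         if (start[0] == end[0]) & (start[1] < end[1]):
--             for i in range(- (start[1] - end[1]) + 1):
--                 matrix[start[0], start[1] + i] += 1
--
--         elif (start[0] == end[0]) & (start[1] > end[1]):
--             for i in range((start[1] - end[1]) + 1):
--                 matrix[start[0], start[1] - i] += 1
--
--         # Case 2: vertical line (y1 == y2)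
--         elif (start[1] == end[1]) & (start[0] < end[0]):
--             for i in range(- (start[0] - end[0]) + 1):
--                 matrix[start[0] + i, end[1]] += 1
--
--         elif (start[1] == end[1]) & (start[0] > end[0]):
--             for i in range((start[0] - end[0]) + 1):
--                 matrix[start[0] - i, start[1]] += 1
--
--     return matrix
-- ===== SOURCE B (Python) =====
-- def mark_points(matrix, list_of_coords):
--     # Grid-driven counting instead of segment walking: for each existing grid cell,
--     # count in one pass how many horizontal/vertical segments cover it, and add that
--     # count to its value.  Mutates matrix in place (same side effect) and returns it.
--     def covers(x, y, seg):
--         (x1, y1), (x2, y2) = seg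
--         if x1 == x2 and y1 != y2:
--             return x == x1 and min(y1, y2) <= y <= max(y1, y2)
--         if y1 == y2 and x1 != x2:
--             return y == y1 and min(x1, x2) <= x <= max(x1, x2)
--         return False  # single points and diagonals are never marked
--     for (x, y) in matrix:
--         matrix[x, y] += sum(covers(x, y, seg) for seg in list_of_coords)
--     return matrix
-- ===== Notes on version B (the rewrite author's own statement) =====
-- stated objective: alternative
-- what changed: Inverts the traversal: instead of walking every segment cell-by-cell and incrementing the grid at each step (four direction-specific loops), B iterates once over the grid cells and, for each cell, counts with an interval-containment test how many segments cover it, adding that count in one update per cell.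
import Mathlib
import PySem

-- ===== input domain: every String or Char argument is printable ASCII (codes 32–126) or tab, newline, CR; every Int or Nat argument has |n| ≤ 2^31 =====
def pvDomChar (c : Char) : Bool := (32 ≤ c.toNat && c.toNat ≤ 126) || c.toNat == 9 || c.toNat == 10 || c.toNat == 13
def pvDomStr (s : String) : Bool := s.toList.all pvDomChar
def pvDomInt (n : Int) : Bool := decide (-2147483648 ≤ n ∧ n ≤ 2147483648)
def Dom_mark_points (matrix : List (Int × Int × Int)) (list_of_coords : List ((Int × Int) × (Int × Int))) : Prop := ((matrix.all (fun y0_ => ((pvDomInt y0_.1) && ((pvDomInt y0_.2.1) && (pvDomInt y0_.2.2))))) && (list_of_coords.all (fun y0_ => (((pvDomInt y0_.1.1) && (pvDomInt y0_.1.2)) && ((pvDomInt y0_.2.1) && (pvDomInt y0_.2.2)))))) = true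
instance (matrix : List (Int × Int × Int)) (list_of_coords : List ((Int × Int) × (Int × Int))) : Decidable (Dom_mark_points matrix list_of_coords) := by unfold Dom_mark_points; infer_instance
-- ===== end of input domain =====

-- B inverts the traversal: instead of walking every segment cell-by-cell (A's four direction
-- loops), it iterates once over the grid cells and adds per cell the count of segments covering
-- it (objective: alternative).  Python A and B both mutate `matrix` in place and return it; the
-- theorems are about the returned value.
-- ===== PORT A =====
-- dict `matrix[(x,y)] += 1` on an existing key: update the value in place, keep position
-- (the KeyError on an absent key is excluded by Pre_).
def pvBump (m : List (Int × Int × Int)) (x y : Int) : List (Int × Int × Int) :=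
  match m with
  | [] => []
  | (a, b, v) :: t => if a = x ∧ b = y then (a, b, v + 1) :: t else (a, b, v) :: pvBump t x y

def markA_seg (m : List (Int × Int × Int)) (c : (Int × Int) × (Int × Int)) : List (Int × Int × Int) :=
  let start := c.1
  let e := c.2
  if start.1 = e.1 ∧ start.2 < e.2 then
    (PySem.List.pyRange 0 (-(start.2 - e.2) + 1) 1).foldl (fun m i => pvBump m start.1 (start.2 + i)) m
  else if start.1 = e.1 ∧ start.2 > e.2 then
    (PySem.List.pyRange 0 ((start.2 - e.2) + 1) 1).foldl (fun m i => pvBump m start.1 (start.2 - i)) m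
  else if start.2 = e.2 ∧ start.1 < e.1 then
    (PySem.List.pyRange 0 (-(start.1 - e.1) + 1) 1).foldl (fun m i => pvBump m (start.1 + i) e.2) m
  else if start.2 = e.2 ∧ start.1 > e.1 then
    (PySem.List.pyRange 0 ((start.1 - e.1) + 1) 1).foldl (fun m i => pvBump m (start.1 - i) start.2) m
  else m

def mark_points (matrix : List (Int × Int × Int)) (list_of_coords : List ((Int × Int) × (Int × Int))) : List (Int × Int × Int) :=
  list_of_coords.foldl markA_seg matrix

-- ===== PORT B =====
-- `covers(x, y, seg)` of Source B
def pvCovers (x y : Int) (c : (Int × Int) × (Int × Int)) : Bool :=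
  let x1 := c.1.1; let y1 := c.1.2; let x2 := c.2.1; let y2 := c.2.2
  if x1 = x2 ∧ y1 ≠ y2 then decide (x = x1 ∧ min y1 y2 ≤ y ∧ y ≤ max y1 y2)
  else if y1 = y2 ∧ x1 ≠ x2 then decide (y = y1 ∧ min x1 x2 ≤ x ∧ x ≤ max x1 x2)
  else false

-- per-cell update: value += number of covering segments
def mark_points_alt (matrix : List (Int × Int × Int)) (list_of_coords : List ((Int × Int) × (Int × Int))) : List (Int × Int × Int) :=
  matrix.map (fun e => (e.1, e.2.1, e.2.2 + (list_of_coords.countP (fun c => pvCovers e.1 e.2.1 c) : Int)))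

-- ===== PRECONDITION & SPEC =====
-- Pre_ excludes exactly (a) the inputs on which Python A raises KeyError — some point of a
-- non-degenerate horizontal/vertical segment is not a key of `matrix` (the length guard is a
-- fast necessary condition: distinct keys, so a longer segment must miss one) — and (b)
-- association lists with a duplicate (x,y) key, which represent no Python dict at all, so A's
-- behaviour there is undefined.
def pvHasKey (matrix : List (Int × Int × Int)) (x y : Int) : Bool :=
  matrix.any (fun e => e.1 == x && e.2.1 == y)

def pvSegOk (matrix : List (Int × Int × Int)) (c : (Int × Int) × (Int × Int)) : Bool :=
  ((c.1.1 != c.2.1) || (c.1.2 == c.2.2) ||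
     (decide (max c.1.2 c.2.2 - min c.1.2 c.2.2 + 1 ≤ (matrix.length : Int)) &&
      (PySem.List.pyRange (min c.1.2 c.2.2) (max c.1.2 c.2.2 + 1) 1).all
        (fun y => pvHasKey matrix c.1.1 y)))
  &&
  ((c.1.2 != c.2.2) || (c.1.1 == c.2.1) ||
     (decide (max c.1.1 c.2.1 - min c.1.1 c.2.1 + 1 ≤ (matrix.length : Int)) &&
      (PySem.List.pyRange (min c.1.1 c.2.1) (max c.1.1 c.2.1 + 1) 1).all
        (fun x => pvHasKey matrix x c.1.2)))

def Pre_mark_points (matrix : List (Int × Int × Int)) (list_of_coords : List ((Int × Int) × (Int × Int))) : Prop :=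
  (matrix.map (fun e => (e.1, e.2.1))).Nodup ∧ (list_of_coords.all (pvSegOk matrix)) = true
instance (matrix : List (Int × Int × Int)) (list_of_coords : List ((Int × Int) × (Int × Int))) : Decidable (Pre_mark_points matrix list_of_coords) := by unfold Pre_mark_points; infer_instance

def pvWitness_mark_points : (List (Int × Int × Int)) × (List ((Int × Int) × (Int × Int))) :=
  ([(0, 0, 0), (0, 1, 0), (1, 0, 0)], [((0, 0), (0, 1)), ((1, 0), (0, 0))])

def Spec_mark_points (matrix : List (Int × Int × Int)) (list_of_coords : List ((Int × Int) × (Int × Int))) (out : List (Int × Int × Int)) : Prop := out = mark_points_alt matrix list_of_coords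
instance (matrix : List (Int × Int × Int)) (list_of_coords : List ((Int × Int) × (Int × Int))) (out : List (Int × Int × Int)) : Decidable (Spec_mark_points matrix list_of_coords out) := by unfold Spec_mark_points; infer_instance

-- ===== CLAIM (what is proved, stated in full; the proofs are below) =====
def Claim_equal_mark_points : Prop := ∀ (matrix : List (Int × Int × Int)) (list_of_coords : List ((Int × Int) × (Int × Int))), Dom_mark_points matrix list_of_coords → Pre_mark_points matrix list_of_coords → Spec_mark_points matrix list_of_coords (mark_points matrix list_of_coords)


-- ===== LEMMAS AND PROOFS =====
-- value-adjustment maps: every update either side performs has this shape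
def pvAdd (g : Int → Int → Int) (m : List (Int × Int × Int)) : List (Int × Int × Int) :=
  m.map (fun e => (e.1, e.2.1, e.2.2 + g e.1 e.2.1))

theorem pvAdd_keys (g : Int → Int → Int) (m : List (Int × Int × Int)) :
    (pvAdd g m).map (fun e => (e.1, e.2.1)) = m.map (fun e => (e.1, e.2.1)) := by
  simp [pvAdd, List.map_map, Function.comp]

theorem pvAdd_zero (g : Int → Int → Int) (m : List (Int × Int × Int))
    (h : ∀ a b, g a b = 0) : pvAdd g m = m := by
  induction m with
  | nil => rfl
  | cons e t ih =>
    show (e.1, e.2.1, e.2.2 + g e.1 e.2.1) :: pvAdd g t = e :: t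
    rw [h, add_zero, ih]

theorem pvAdd_add (g h : Int → Int → Int) (m : List (Int × Int × Int)) :
    pvAdd h (pvAdd g m) = pvAdd (fun a b => g a b + h a b) m := by
  induction m with
  | nil => rfl
  | cons e t ih =>
    show (e.1, e.2.1, e.2.2 + g e.1 e.2.1 + h e.1 e.2.1) :: pvAdd h (pvAdd g t)
        = (e.1, e.2.1, e.2.2 + (g e.1 e.2.1 + h e.1 e.2.1)) :: pvAdd (fun a b => g a b + h a b) t
    rw [add_assoc, ih]

theorem pvAdd_congr (g h : Int → Int → Int) (m : List (Int × Int × Int))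
    (he : ∀ a b, g a b = h a b) : pvAdd g m = pvAdd h m := by
  simp only [pvAdd, he]

theorem pvAdd_ind_not_mem (x y : Int) (m : List (Int × Int × Int))
    (h : (x, y) ∉ m.map (fun e => (e.1, e.2.1))) :
    pvAdd (fun a b => if a = x ∧ b = y then 1 else 0) m = m := by
  induction m with
  | nil => rfl
  | cons e t ih =>
    simp only [List.map_cons, List.mem_cons, not_or] at h
    show (e.1, e.2.1, e.2.2 + if e.1 = x ∧ e.2.1 = y then 1 else 0)
        :: pvAdd (fun a b => if a = x ∧ b = y then 1 else 0) t = e :: t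
    have hne : ¬ (e.1 = x ∧ e.2.1 = y) := fun hc => h.1 (by rw [hc.1, hc.2])
    rw [if_neg hne, add_zero, ih h.2]

theorem bump_eq (m : List (Int × Int × Int)) (x y : Int)
    (hnd : (m.map (fun e => (e.1, e.2.1))).Nodup) :
    pvBump m x y = pvAdd (fun a b => if a = x ∧ b = y then 1 else 0) m := by
  induction m with
  | nil => rfl
  | cons e t ih =>
    obtain ⟨a, b, v⟩ := e
    simp only [List.map_cons, List.nodup_cons] at hnd
    show (if a = x ∧ b = y then (a, b, v + 1) :: t else (a, b, v) :: pvBump t x y)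
        = (a, b, v + if a = x ∧ b = y then 1 else 0)
            :: pvAdd (fun a b => if a = x ∧ b = y then 1 else 0) t
    by_cases h : a = x ∧ b = y
    · obtain ⟨rfl, rfl⟩ := h
      rw [if_pos ⟨rfl, rfl⟩, if_pos ⟨rfl, rfl⟩, pvAdd_ind_not_mem a b t hnd.1]
    · rw [if_neg h, if_neg h, add_zero, ih hnd.2]

-- fold of bumps along any point parameterisation = one count per cell
theorem foldl_bump (fx fy : Int → Int) (is : List Int) :
    ∀ m : List (Int × Int × Int), (m.map (fun e => (e.1, e.2.1))).Nodup →
    is.foldl (fun m i => pvBump m (fx i) (fy i)) m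
      = pvAdd (fun a b => (is.countP (fun i => (fx i == a && fy i == b)) : Int)) m := by
  induction is with
  | nil =>
    intro m _
    simp only [List.foldl_nil, List.countP_nil]
    exact (pvAdd_zero _ m (fun _ _ => rfl)).symm
  | cons i is ih =>
    intro m hnd
    simp only [List.foldl_cons]
    rw [bump_eq m _ _ hnd, ih _ (by rw [pvAdd_keys]; exact hnd), pvAdd_add]
    refine pvAdd_congr _ _ _ ?_
    intro a b
    simp only [List.countP_cons]
    by_cases h : fx i = a ∧ fy i = b
    · have hp : (fx i == a && fy i == b) = true := by simp [h.1, h.2]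
      rw [if_pos ⟨h.1.symm, h.2.symm⟩, hp, if_pos rfl]
      push_cast; ring
    · have hb : (fx i == a && fy i == b) = false := by
        simp only [Bool.and_eq_false_iff, beq_eq_false_iff_ne, ne_eq]
        by_cases h1 : fx i = a
        · exact Or.inr (fun h2 => h ⟨h1, h2⟩)
        · exact Or.inl h1
      rw [if_neg (fun hc => h ⟨hc.1.symm, hc.2.symm⟩), hb]
      simp

theorem count_range (n : ℕ) (t : Int) :
    ((List.range n).countP (fun k : ℕ => ((k : Int) == t))) = if 0 ≤ t ∧ t < n then 1 else 0 := by
  induction n with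
  | zero =>
    simp only [List.range_zero, List.countP_nil, Nat.cast_zero]
    rw [if_neg (by omega)]
  | succ n ih =>
    rw [List.range_succ, List.countP_append, ih]
    simp only [List.countP_cons, List.countP_nil]
    by_cases h : (n : Int) = t
    · have hb : ((n : Int) == t) = true := by simp [h]
      have h1 : ¬ (0 ≤ t ∧ t < (n : Int)) := by omega
      have h2 : 0 ≤ t ∧ t < ((n + 1 : ℕ) : Int) := by omega
      rw [hb, if_neg h1, if_pos h2]
      norm_num
    · have hb : ((n : Int) == t) = false := by simp [h]
      rw [hb]
      by_cases h2 : 0 ≤ t ∧ t < (n : Int)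
      · have h3 : 0 ≤ t ∧ t < ((n + 1 : ℕ) : Int) := by omega
        rw [if_pos h2, if_pos h3]
        norm_num
      · have h3 : ¬ (0 ≤ t ∧ t < ((n + 1 : ℕ) : Int)) := by omega
        rw [if_neg h2, if_neg h3]
        norm_num

theorem count_pyRange (b t : Int) :
    ((PySem.List.pyRange 0 b 1).countP (fun i => (i == t))) = if 0 ≤ t ∧ t < b then 1 else 0 := by
  rw [PySem.List.pyRange_one, List.countP_map]
  have hc : ((fun i => i == t) ∘ fun k : ℕ => (0 : Int) + k) = fun k : ℕ => ((k : Int) == t) := by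
    funext k; simp [Function.comp]
  rw [hc, count_range]
  by_cases h : 0 ≤ t ∧ t < b
  · rw [if_pos h, if_pos (by omega)]
  · rw [if_neg h, if_neg (by omega)]

-- counts for the four walk shapes: each cell is visited at most once
theorem walk_h_add (x1 y1 n a b : Int) :
    ((PySem.List.pyRange 0 n 1).countP (fun i => (x1 == a && (y1 + i) == b)) : Int)
      = if a = x1 ∧ y1 ≤ b ∧ b < y1 + n then 1 else 0 := by
  by_cases ha : a = x1
  · have h1 : (fun i : Int => (x1 == a && (y1 + i) == b)) = fun i : Int => (i == (b - y1)) := by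
      funext i
      by_cases h : y1 + i = b
      · simp [ha, show i = b - y1 by omega]
      · have h2 : i ≠ b - y1 := by omega
        have l : ((y1 + i) == b) = false := by rw [beq_eq_false_iff_ne]; exact h
        have r : (i == (b - y1)) = false := by rw [beq_eq_false_iff_ne]; exact h2
        rw [l, r, Bool.and_false]
    rw [h1, count_pyRange]
    by_cases h2 : y1 ≤ b ∧ b < y1 + n
    · rw [if_pos (by omega), if_pos ⟨ha, h2.1, h2.2⟩]; norm_num
    · rw [if_neg (by omega), if_neg (by rintro ⟨-, hc⟩; exact h2 ⟨hc.1, hc.2⟩)]; norm_num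
  · have h1 : (fun i : Int => (x1 == a && (y1 + i) == b)) = fun _ : Int => false := by
      funext i
      have hf : (x1 == a) = false := by rw [beq_eq_false_iff_ne]; exact fun h => ha h.symm
      simp [hf]
    rw [h1]
    simp only [List.countP_false, Function.const, Nat.cast_zero]
    rw [if_neg (by rintro ⟨hc, -⟩; exact ha hc)]

theorem walk_h_sub (x1 y1 n a b : Int) :
    ((PySem.List.pyRange 0 n 1).countP (fun i => (x1 == a && (y1 - i) == b)) : Int)
      = if a = x1 ∧ y1 - n < b ∧ b ≤ y1 then 1 else 0 := by
  by_cases ha : a = x1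
  · have h1 : (fun i : Int => (x1 == a && (y1 - i) == b)) = fun i : Int => (i == (y1 - b)) := by
      funext i
      by_cases h : y1 - i = b
      · simp [ha, show i = y1 - b by omega]
      · have h2 : i ≠ y1 - b := by omega
        have l : ((y1 - i) == b) = false := by rw [beq_eq_false_iff_ne]; exact h
        have r : (i == (y1 - b)) = false := by rw [beq_eq_false_iff_ne]; exact h2
        rw [l, r, Bool.and_false]
    rw [h1, count_pyRange]
    by_cases h2 : y1 - n < b ∧ b ≤ y1
    · rw [if_pos (by omega), if_pos ⟨ha, h2.1, h2.2⟩]; norm_num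
    · rw [if_neg (by omega), if_neg (by rintro ⟨-, hc⟩; exact h2 ⟨hc.1, hc.2⟩)]; norm_num
  · have h1 : (fun i : Int => (x1 == a && (y1 - i) == b)) = fun _ : Int => false := by
      funext i
      have hf : (x1 == a) = false := by rw [beq_eq_false_iff_ne]; exact fun h => ha h.symm
      simp [hf]
    rw [h1]
    simp only [List.countP_false, Function.const, Nat.cast_zero]
    rw [if_neg (by rintro ⟨hc, -⟩; exact ha hc)]

theorem walk_v_add (x1 y1 n a b : Int) :
    ((PySem.List.pyRange 0 n 1).countP (fun i => ((x1 + i) == a && y1 == b)) : Int)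
      = if b = y1 ∧ x1 ≤ a ∧ a < x1 + n then 1 else 0 := by
  by_cases hb : b = y1
  · have h1 : (fun i : Int => ((x1 + i) == a && y1 == b)) = fun i : Int => (i == (a - x1)) := by
      funext i
      by_cases h : x1 + i = a
      · simp [hb, show i = a - x1 by omega]
      · have h2 : i ≠ a - x1 := by omega
        have l : ((x1 + i) == a) = false := by rw [beq_eq_false_iff_ne]; exact h
        have r : (i == (a - x1)) = false := by rw [beq_eq_false_iff_ne]; exact h2
        rw [l, r, Bool.false_and]
    rw [h1, count_pyRange]
    by_cases h2 : x1 ≤ a ∧ a < x1 + n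
    · rw [if_pos (by omega), if_pos ⟨hb, h2.1, h2.2⟩]; norm_num
    · rw [if_neg (by omega), if_neg (by rintro ⟨-, hc⟩; exact h2 ⟨hc.1, hc.2⟩)]; norm_num
  · have h1 : (fun i : Int => ((x1 + i) == a && y1 == b)) = fun _ : Int => false := by
      funext i
      have hf : (y1 == b) = false := by rw [beq_eq_false_iff_ne]; exact fun h => hb h.symm
      simp [hf]
    rw [h1]
    simp only [List.countP_false, Function.const, Nat.cast_zero]
    rw [if_neg (by rintro ⟨hc, -⟩; exact hb hc)]

theorem walk_v_sub (x1 y1 n a b : Int) :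
    ((PySem.List.pyRange 0 n 1).countP (fun i => ((x1 - i) == a && y1 == b)) : Int)
      = if b = y1 ∧ x1 - n < a ∧ a ≤ x1 then 1 else 0 := by
  by_cases hb : b = y1
  · have h1 : (fun i : Int => ((x1 - i) == a && y1 == b)) = fun i : Int => (i == (x1 - a)) := by
      funext i
      by_cases h : x1 - i = a
      · simp [hb, show i = x1 - a by omega]
      · have h2 : i ≠ x1 - a := by omega
        have l : ((x1 - i) == a) = false := by rw [beq_eq_false_iff_ne]; exact h
        have r : (i == (x1 - a)) = false := by rw [beq_eq_false_iff_ne]; exact h2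
        rw [l, r, Bool.false_and]
    rw [h1, count_pyRange]
    by_cases h2 : x1 - n < a ∧ a ≤ x1
    · rw [if_pos (by omega), if_pos ⟨hb, h2.1, h2.2⟩]; norm_num
    · rw [if_neg (by omega), if_neg (by rintro ⟨-, hc⟩; exact h2 ⟨hc.1, hc.2⟩)]; norm_num
  · have h1 : (fun i : Int => ((x1 - i) == a && y1 == b)) = fun _ : Int => false := by
      funext i
      have hf : (y1 == b) = false := by rw [beq_eq_false_iff_ne]; exact fun h => hb h.symm
      simp [hf]
    rw [h1]
    simp only [List.countP_false, Function.const, Nat.cast_zero]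
    rw [if_neg (by rintro ⟨hc, -⟩; exact hb hc)]

-- the per-segment equality: a cell is bumped once iff the segment covers it
theorem seg_eq (m : List (Int × Int × Int)) (c : (Int × Int) × (Int × Int))
    (hnd : (m.map (fun e => (e.1, e.2.1))).Nodup) :
    markA_seg m c = pvAdd (fun a b => if pvCovers a b c then 1 else 0) m := by
  obtain ⟨⟨x1, y1⟩, x2, y2⟩ := c
  simp only [markA_seg]
  rcases lt_trichotomy x1 x2 with hx | hx | hx <;>
    rcases lt_trichotomy y1 y2 with hy | hy | hy
  -- x1 < x2, y1 < y2 : diagonal, both sides leave m unchanged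
  · rw [if_neg (by rintro ⟨rfl, h⟩; omega), if_neg (by rintro ⟨rfl, h⟩; omega),
        if_neg (by rintro ⟨rfl, h⟩; omega), if_neg (by rintro ⟨rfl, h⟩; omega)]
    refine (pvAdd_zero _ m (fun a b => ?_)).symm
    have hcv : pvCovers a b ((x1, y1), (x2, y2)) = false := by
      simp only [pvCovers]
      rw [if_neg (by rintro ⟨rfl, h⟩; omega), if_neg (by rintro ⟨rfl, h⟩; omega)]
    rw [hcv]
    rfl
  -- x1 < x2, y1 = y2 : branch 3 (vertical, increasing x)
  · subst hy
    rw [if_neg (by rintro ⟨rfl, h⟩; omega), if_neg (by rintro ⟨rfl, h⟩; omega),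
        if_pos ⟨rfl, hx⟩]
    refine Eq.trans (foldl_bump (fun i => x1 + i) (fun _ => y1) _ m hnd)
      (pvAdd_congr _ _ m ?_)
    intro a b
    beta_reduce
    rw [walk_v_add]
    by_cases hA : b = y1 ∧ x1 ≤ a ∧ a < x1 + (-(x1 - x2) + 1)
    · have hcv : pvCovers a b ((x1, y1), (x2, y1)) = true := by
        simp only [pvCovers]
        rw [if_neg (by rintro ⟨-, h⟩; exact h rfl)]
        rw [if_pos (by exact ⟨trivial, by omega⟩)]
        exact decide_eq_true ⟨hA.1, by omega, by omega⟩
      rw [if_pos hA, hcv]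
      rfl
    · have hcv : pvCovers a b ((x1, y1), (x2, y1)) = false := by
        simp only [pvCovers]
        rw [if_neg (by rintro ⟨-, h⟩; exact h rfl)]
        rw [if_pos (by exact ⟨trivial, by omega⟩)]
        exact decide_eq_false (by rintro ⟨rfl, h1, h2⟩; exact hA ⟨rfl, by omega, by omega⟩)
      rw [if_neg hA, hcv]
      rfl
  -- x1 < x2, y2 < y1 : diagonal
  · rw [if_neg (by rintro ⟨rfl, h⟩; omega), if_neg (by rintro ⟨rfl, h⟩; omega),
        if_neg (by rintro ⟨rfl, h⟩; omega), if_neg (by rintro ⟨rfl, h⟩; omega)]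
    refine (pvAdd_zero _ m (fun a b => ?_)).symm
    have hcv : pvCovers a b ((x1, y1), (x2, y2)) = false := by
      simp only [pvCovers]
      rw [if_neg (by rintro ⟨rfl, h⟩; omega), if_neg (by rintro ⟨rfl, h⟩; omega)]
    rw [hcv]
    rfl
  -- x1 = x2, y1 < y2 : branch 1 (horizontal, increasing y)
  · subst hx
    rw [if_pos ⟨rfl, hy⟩]
    refine Eq.trans (foldl_bump (fun _ => x1) (fun i => y1 + i) _ m hnd)
      (pvAdd_congr _ _ m ?_)
    intro a b
    beta_reduce
    rw [walk_h_add]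
    by_cases hA : a = x1 ∧ y1 ≤ b ∧ b < y1 + (-(y1 - y2) + 1)
    · have hcv : pvCovers a b ((x1, y1), (x1, y2)) = true := by
        simp only [pvCovers]
        rw [if_pos (by exact ⟨trivial, by omega⟩)]
        exact decide_eq_true ⟨hA.1, by omega, by omega⟩
      rw [if_pos hA, hcv]
      rfl
    · have hcv : pvCovers a b ((x1, y1), (x1, y2)) = false := by
        simp only [pvCovers]
        rw [if_pos (by exact ⟨trivial, by omega⟩)]
        exact decide_eq_false (by rintro ⟨rfl, h1, h2⟩; exact hA ⟨rfl, by omega, by omega⟩)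
      rw [if_neg hA, hcv]
      rfl
  -- x1 = x2, y1 = y2 : single point, both sides leave m unchanged
  · subst hx; subst hy
    rw [if_neg (by rintro ⟨-, h⟩; omega), if_neg (by rintro ⟨-, h⟩; omega),
        if_neg (by rintro ⟨-, h⟩; omega), if_neg (by rintro ⟨-, h⟩; omega)]
    refine (pvAdd_zero _ m (fun a b => ?_)).symm
    have hcv : pvCovers a b ((x1, y1), (x1, y1)) = false := by
      simp only [pvCovers]
      rw [if_neg (by rintro ⟨-, h⟩; exact h rfl), if_neg (by rintro ⟨-, h⟩; exact h rfl)]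
    rw [hcv]
    rfl
  -- x1 = x2, y2 < y1 : branch 2 (horizontal, decreasing y)
  · subst hx
    rw [if_neg (by rintro ⟨-, h⟩; omega), if_pos ⟨rfl, hy⟩]
    refine Eq.trans (foldl_bump (fun _ => x1) (fun i => y1 - i) _ m hnd)
      (pvAdd_congr _ _ m ?_)
    intro a b
    beta_reduce
    rw [walk_h_sub]
    by_cases hA : a = x1 ∧ y1 - (y1 - y2 + 1) < b ∧ b ≤ y1
    · have hcv : pvCovers a b ((x1, y1), (x1, y2)) = true := by
        simp only [pvCovers]
        rw [if_pos (by exact ⟨trivial, by omega⟩)]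
        exact decide_eq_true ⟨hA.1, by omega, by omega⟩
      rw [if_pos hA, hcv]
      rfl
    · have hcv : pvCovers a b ((x1, y1), (x1, y2)) = false := by
        simp only [pvCovers]
        rw [if_pos (by exact ⟨trivial, by omega⟩)]
        exact decide_eq_false (by rintro ⟨rfl, h1, h2⟩; exact hA ⟨rfl, by omega, by omega⟩)
      rw [if_neg hA, hcv]
      rfl
  -- x2 < x1, y1 < y2 : diagonal
  · rw [if_neg (by rintro ⟨rfl, h⟩; omega), if_neg (by rintro ⟨rfl, h⟩; omega),
        if_neg (by rintro ⟨rfl, h⟩; omega), if_neg (by rintro ⟨rfl, h⟩; omega)]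
    refine (pvAdd_zero _ m (fun a b => ?_)).symm
    have hcv : pvCovers a b ((x1, y1), (x2, y2)) = false := by
      simp only [pvCovers]
      rw [if_neg (by rintro ⟨rfl, h⟩; omega), if_neg (by rintro ⟨rfl, h⟩; omega)]
    rw [hcv]
    rfl
  -- x2 < x1, y1 = y2 : branch 4 (vertical, decreasing x)
  · subst hy
    rw [if_neg (by rintro ⟨rfl, h⟩; omega), if_neg (by rintro ⟨rfl, h⟩; omega),
        if_neg (by rintro ⟨-, h⟩; omega), if_pos ⟨rfl, hx⟩]
    refine Eq.trans (foldl_bump (fun i => x1 - i) (fun _ => y1) _ m hnd)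
      (pvAdd_congr _ _ m ?_)
    intro a b
    beta_reduce
    rw [walk_v_sub]
    by_cases hA : b = y1 ∧ x1 - (x1 - x2 + 1) < a ∧ a ≤ x1
    · have hcv : pvCovers a b ((x1, y1), (x2, y1)) = true := by
        simp only [pvCovers]
        rw [if_neg (by rintro ⟨-, h⟩; exact h rfl)]
        rw [if_pos (by exact ⟨trivial, by omega⟩)]
        exact decide_eq_true ⟨hA.1, by omega, by omega⟩
      rw [if_pos hA, hcv]
      rfl
    · have hcv : pvCovers a b ((x1, y1), (x2, y1)) = false := by
        simp only [pvCovers]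
        rw [if_neg (by rintro ⟨-, h⟩; exact h rfl)]
        rw [if_pos (by exact ⟨trivial, by omega⟩)]
        exact decide_eq_false (by rintro ⟨rfl, h1, h2⟩; exact hA ⟨rfl, by omega, by omega⟩)
      rw [if_neg hA, hcv]
      rfl
  -- x2 < x1, y2 < y1 : diagonal
  · rw [if_neg (by rintro ⟨rfl, h⟩; omega), if_neg (by rintro ⟨rfl, h⟩; omega),
        if_neg (by rintro ⟨rfl, h⟩; omega), if_neg (by rintro ⟨rfl, h⟩; omega)]
    refine (pvAdd_zero _ m (fun a b => ?_)).symm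
    have hcv : pvCovers a b ((x1, y1), (x2, y2)) = false := by
      simp only [pvCovers]
      rw [if_neg (by rintro ⟨rfl, h⟩; omega), if_neg (by rintro ⟨rfl, h⟩; omega)]
    rw [hcv]
    rfl

theorem fold_segs (l : List ((Int × Int) × (Int × Int))) :
    ∀ m : List (Int × Int × Int), (m.map (fun e => (e.1, e.2.1))).Nodup →
    l.foldl markA_seg m = pvAdd (fun a b => (l.countP (fun c => pvCovers a b c) : Int)) m := by
  induction l with
  | nil =>
    intro m _
    simp only [List.foldl_nil, List.countP_nil]
    exact (pvAdd_zero _ m (fun _ _ => rfl)).symm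
  | cons c l ih =>
    intro m hnd
    simp only [List.foldl_cons]
    rw [seg_eq m c hnd, ih _ (by rw [pvAdd_keys]; exact hnd), pvAdd_add]
    refine pvAdd_congr _ _ _ ?_
    intro a b
    simp only [List.countP_cons]
    by_cases h : pvCovers a b c
    · simp only [h]; push_cast; ring
    · simp [h]

-- ===== VERDICT (by name: the statements are the Claim_ definitions above) =====
theorem mark_points_spec : Claim_equal_mark_points := by
  intro m l _hd hp
  unfold Spec_mark_points mark_points
  rw [fold_segs l m hp.1]
  rfl
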